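-- pv_equiv track=rewrite | github.com/pouriamrt/gralc-rag | src/gralc_rag/chunking/semantic.py | _merge_small_groups
-- ===== SOURCE A (Python) =====
-- def _word_count(text: str) -> int:
--     return len(text.split())
--
-- def _merge_small_groups(
--     groups: list[list[str]], min_words: int = 50
-- ) -> list[list[str]]:
--     """Merge groups with fewer than *min_words* words into neighbours."""
--     if len(groups) <= 1:
--         return groups
--
--     merged: list[list[str]] = [groups[0]]
--     for group in groups[1:]:
--         if _word_count(" ".join(merged[-1])) < min_words:
--             merged[-1].extend(group)
--         else:
--             merged.append(group)
--
--     # Final group might still be too small — merge backwards.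
--     if len(merged) >= 2 and _word_count(" ".join(merged[-1])) < min_words:
--         merged[-2].extend(merged.pop())
--
--     return merged
-- ===== SOURCE B (Python) =====
-- def _merge_small_groups(
--     groups: list[list[str]], min_words: int = 50
-- ) -> list[list[str]]:
--     """Merge groups with fewer than *min_words* words into neighbours.
--
--     One pass with an incrementally maintained word count of the current last
--     group, instead of re-joining and re-splitting it on every iteration.
--     (Unlike the original, this does not mutate the input lists in place;
--     the return value is identical.)
--     """
--     if len(groups) <= 1:
--         return groups
--
--     def group_wc(g):
--         return sum(len(s.split()) for s in g)
--
--     merged = [list(groups[0])]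
--     last_wc = group_wc(groups[0])
--     for group in groups[1:]:
--         if last_wc < min_words:
--             merged[-1].extend(group)
--             last_wc += group_wc(group)
--         else:
--             merged.append(list(group))
--             last_wc = group_wc(group)
--
--     if len(merged) >= 2 and last_wc < min_words:
--         last = merged.pop()
--         merged[-1].extend(last)
--
--     return merged
-- ===== Notes on version B (the rewrite author's own statement) =====
-- stated objective: faster
-- what changed: Instead of re-joining the whole last merged group and re-splitting it to count its words on every iteration, B maintains the last group's word count incrementally (word count of a space-join equals the sum of the members' word counts), giving one pass over the words in total.
import Mathlib
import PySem

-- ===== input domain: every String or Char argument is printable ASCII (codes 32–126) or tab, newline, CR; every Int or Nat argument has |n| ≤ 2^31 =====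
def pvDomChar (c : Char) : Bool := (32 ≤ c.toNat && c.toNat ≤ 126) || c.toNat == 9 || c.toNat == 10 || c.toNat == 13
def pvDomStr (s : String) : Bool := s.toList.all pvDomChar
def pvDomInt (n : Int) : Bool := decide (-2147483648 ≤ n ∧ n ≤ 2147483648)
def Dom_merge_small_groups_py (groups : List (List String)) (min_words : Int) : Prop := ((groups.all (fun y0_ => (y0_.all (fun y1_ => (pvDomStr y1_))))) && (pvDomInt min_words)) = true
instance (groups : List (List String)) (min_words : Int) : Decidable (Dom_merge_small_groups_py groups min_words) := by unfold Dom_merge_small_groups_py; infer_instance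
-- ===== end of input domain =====

-- B replaces A's per-iteration rejoin-and-resplit word count of the growing last group by an
-- incrementally maintained running count (objective: faster). A mutates its argument's inner
-- lists in place, B does not; the equivalence proved here is about the RETURN value only.

-- ===== PORT A =====
-- len(text.split())
def pvWordCount (text : String) : Int := ((PySem.Str.split₀ text).length : Int)

-- Literal port of A; `merged` is kept in REVERSE order (head = merged[-1]), reversed at the end.
def merge_small_groups_py (groups : List (List String)) (min_words : Int) : List (List String) :=
  if groups.length ≤ 1 then groups
  else
    match groups with
    | [] => groups   -- unreachable (length > 1)
    | g0 :: rest =>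
      let rm := rest.foldl (fun rm group =>
        match rm with
        | [] => [group]   -- unreachable: rm is never empty
        | last :: prev =>
          if pvWordCount (PySem.Str.join " " last) < min_words then (last ++ group) :: prev
          else group :: last :: prev) [g0]
      -- final backwards merge: len(merged) >= 2 and _word_count(" ".join(merged[-1])) < min_words
      let rm2 :=
        match rm with
        | lastg :: sndg :: prev =>
          if pvWordCount (PySem.Str.join " " lastg) < min_words then (sndg ++ lastg) :: prev
          else rm
        | _ => rm
      rm2.reverse

-- ===== PORT B =====
-- sum(len(s.split()) for s in g)
def pvGroupWC (g : List String) : Int := (((g.map (fun s => (PySem.Str.split₀ s).length)).sum : Nat) : Int)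

-- Literal port of B: state = (current last group, its running word count, finished groups in reverse).
def merge_small_groups_py_alt (groups : List (List String)) (min_words : Int) : List (List String) :=
  if groups.length ≤ 1 then groups
  else
    match groups with
    | [] => groups   -- unreachable (length > 1)
    | g0 :: rest =>
      let st := rest.foldl (fun (st : List String × Int × List (List String)) group =>
        if st.2.1 < min_words then (st.1 ++ group, st.2.1 + pvGroupWC group, st.2.2)
        else (group, pvGroupWC group, st.1 :: st.2.2)) (g0, pvGroupWC g0, [])
      match st.2.2 with
      | [] => [st.1]
      | snd :: prev =>
        if st.2.1 < min_words then ((snd ++ st.1) :: prev).reverse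
        else (st.1 :: snd :: prev).reverse

-- ===== PRECONDITION & SPEC =====
def Spec_merge_small_groups_py (groups : List (List String)) (min_words : Int) (out : List (List String)) : Prop := out = merge_small_groups_py_alt groups min_words
instance (groups : List (List String)) (min_words : Int) (out : List (List String)) : Decidable (Spec_merge_small_groups_py groups min_words out) := by unfold Spec_merge_small_groups_py; infer_instance

-- ===== CLAIM (what is proved, stated in full; the proofs are below) =====
def Claim_equal_merge_small_groups_py : Prop := ∀ (groups : List (List String)) (min_words : Int), Dom_merge_small_groups_py groups min_words → Spec_merge_small_groups_py groups min_words (merge_small_groups_py groups min_words)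

-- ===== LEMMAS AND PROOFS =====

-- `pvFin a cur acc`: the accumulator (newest word first) that `PySem.Chars.split₀.go` has built
-- after consuming `a`, starting from partial word `cur` and accumulator `acc`.
def pvFin : List Char → List Char → List (List Char) → List (List Char)
  | [], cur, acc => if cur.isEmpty then acc else cur.reverse :: acc
  | c :: rest, cur, acc =>
    if PySem.Chars.isspace c then
      if cur.isEmpty then pvFin rest [] acc else pvFin rest [] (cur.reverse :: acc)
    else pvFin rest (c :: cur) acc

theorem go_eq_pvFin (a : List Char) : ∀ cur acc, PySem.Chars.split₀.go a cur acc = (pvFin a cur acc).reverse := by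
  induction a with
  | nil => intro cur acc; simp only [PySem.Chars.split₀.go, pvFin]; split_ifs <;> simp
  | cons c rest ih =>
    intro cur acc
    simp only [PySem.Chars.split₀.go, pvFin]
    split_ifs <;> simp [ih]

theorem pvFin_acc (a : List Char) : ∀ cur acc, pvFin a cur acc = pvFin a cur [] ++ acc := by
  induction a with
  | nil => intro cur acc; simp only [pvFin]; split_ifs <;> simp
  | cons c rest ih =>
    intro cur acc
    simp only [pvFin]
    split_ifs with h1 h2
    · exact ih [] acc
    · rw [ih [] (cur.reverse :: acc), ih [] [cur.reverse], List.append_assoc]; rfl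
    · exact ih (c :: cur) acc

theorem go_space (b : List Char) (a : List Char) : ∀ cur acc,
    PySem.Chars.split₀.go (a ++ ' ' :: b) cur acc = PySem.Chars.split₀.go b [] (pvFin a cur acc) := by
  induction a with
  | nil =>
    intro cur acc
    simp only [List.nil_append, PySem.Chars.split₀.go, pvFin]
    norm_num [show PySem.Chars.isspace ' ' = true from rfl]
    split_ifs <;> rfl
  | cons c rest ih =>
    intro cur acc
    simp only [List.cons_append, PySem.Chars.split₀.go, pvFin]
    split_ifs <;> apply ih

-- splitting at a separating blank: words(a ++ " " ++ b) = words a ++ words b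
theorem split₀_space (a b : List Char) :
    PySem.Chars.split₀ (a ++ ' ' :: b) = PySem.Chars.split₀ a ++ PySem.Chars.split₀ b := by
  simp only [PySem.Chars.split₀]
  rw [go_space, go_eq_pvFin, go_eq_pvFin, go_eq_pvFin, pvFin_acc b [] (pvFin a [] [])]
  simp

-- words of " ".join(ps) are the concatenation of the words of the parts
theorem split₀_join (ps : List (List Char)) :
    PySem.Chars.split₀ (PySem.Chars.join [' '] ps) = ps.flatMap PySem.Chars.split₀ := by
  induction ps with
  | nil => rfl
  | cons p ps ih =>
    cases ps with
    | nil => simp [PySem.Chars.join, List.intercalate]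
    | cons q r =>
      have hj : PySem.Chars.join [' '] (p :: q :: r) = p ++ ' ' :: PySem.Chars.join [' '] (q :: r) := by
        simp [PySem.Chars.join, List.intercalate, List.intersperse]
      rw [hj, split₀_space, ih]
      simp

theorem str_split₀_length (s : String) : (PySem.Str.split₀ s).length = (PySem.Chars.split₀ s.toList).length := by
  rw [← PySem.Str.split₀_map_toList s, List.length_map]

-- the BRIDGE: A's word count of " ".join(g) = B's sum of per-string word counts
theorem wordCount_join (g : List String) : pvWordCount (PySem.Str.join " " g) = pvGroupWC g := by
  have h2 : ((PySem.Str.join " " g)).toList = PySem.Chars.join [' '] (g.map String.toList) := by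
    rw [PySem.Str.toList_join]; rfl
  simp only [pvWordCount, pvGroupWC, str_split₀_length, h2, split₀_join]
  norm_cast
  simp [List.length_flatMap, List.map_map, Function.comp_def]

theorem groupWC_append (a b : List String) : pvGroupWC (a ++ b) = pvGroupWC a + pvGroupWC b := by
  simp [pvGroupWC]

-- loop invariant: A's reversed `merged` is B's (last, count, done) with the count correct
theorem loop_eq (min_words : Int) (rest : List (List String)) : ∀ (last : List String) (done : List (List String)),
    rest.foldl (fun rm group =>
        match rm with
        | [] => [group]
        | last :: prev =>
          if pvWordCount (PySem.Str.join " " last) < min_words then (last ++ group) :: prev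
          else group :: last :: prev) (last :: done)
    = (fun st : List String × Int × List (List String) => st.1 :: st.2.2)
        (rest.foldl (fun (st : List String × Int × List (List String)) group =>
          if st.2.1 < min_words then (st.1 ++ group, st.2.1 + pvGroupWC group, st.2.2)
          else (group, pvGroupWC group, st.1 :: st.2.2)) (last, pvGroupWC last, done)) := by
  induction rest with
  | nil => intro last done; rfl
  | cons g rest ih =>
    intro last done
    rw [List.foldl_cons, List.foldl_cons]
    show rest.foldl _ (if pvWordCount (PySem.Str.join " " last) < min_words then (last ++ g) :: done else g :: last :: done) = _
    rw [wordCount_join]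
    by_cases h : pvGroupWC last < min_words
    · rw [if_pos h, if_pos h,
        show pvGroupWC last + pvGroupWC g = pvGroupWC (last ++ g) from (groupWC_append last g).symm]
      exact ih (last ++ g) done
    · rw [if_neg h, if_neg h]
      exact ih g (last :: done)

-- the running count in B's state stays the word count of the current last group
theorem wc_inv (min_words : Int) (rest : List (List String)) : ∀ st : List String × Int × List (List String),
    pvGroupWC st.1 = st.2.1 →
    pvGroupWC ((rest.foldl (fun (st : List String × Int × List (List String)) group =>
          if st.2.1 < min_words then (st.1 ++ group, st.2.1 + pvGroupWC group, st.2.2)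
          else (group, pvGroupWC group, st.1 :: st.2.2)) st).1)
      = (rest.foldl (fun (st : List String × Int × List (List String)) group =>
          if st.2.1 < min_words then (st.1 ++ group, st.2.1 + pvGroupWC group, st.2.2)
          else (group, pvGroupWC group, st.1 :: st.2.2)) st).2.1 := by
  induction rest with
  | nil => intro st h; exact h
  | cons g rest ih =>
    intro st h
    simp only [List.foldl_cons]
    by_cases hc : st.2.1 < min_words
    · simp only [if_pos hc]
      exact ih _ (by rw [groupWC_append, h])
    · simp only [if_neg hc]
      exact ih _ rfl

-- ===== VERDICT (by name: the statement is the Claim_ definition above) =====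
theorem merge_small_groups_py_spec : Claim_equal_merge_small_groups_py := by
  intro groups min_words _
  unfold Spec_merge_small_groups_py
  cases groups with
  | nil => rfl
  | cons g0 rest =>
    cases rest with
    | nil => rfl
    | cons g1 rest' =>
      have hlen : ¬ (g0 :: g1 :: rest').length ≤ 1 := by simp
      have hwc := wc_inv min_words (g1 :: rest') (g0, pvGroupWC g0, []) rfl
      simp only [merge_small_groups_py, merge_small_groups_py_alt, if_neg hlen]
      rw [loop_eq min_words (g1 :: rest') g0 []]
      revert hwc
      generalize (List.foldl (fun (st : List String × Int × List (List String)) group =>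
          if st.2.1 < min_words then (st.1 ++ group, st.2.1 + pvGroupWC group, st.2.2)
          else (group, pvGroupWC group, st.1 :: st.2.2)) (g0, pvGroupWC g0, []) (g1 :: rest')) = st
      obtain ⟨last, wc, done⟩ := st
      intro hwc
      simp only at hwc
      cases done with
      | nil => simp
      | cons snd prev =>
        simp only [wordCount_join, hwc]
        by_cases hc : wc < min_words
        · simp [if_pos hc]
        · simp [if_neg hc]
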